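-- pv_equiv track=rewrite | github.com/AritaBerisha/ARITA_BERISHA_P1 | FIEK_UDP_server.py | PERSERITJA
-- ===== SOURCE A (Python) =====
-- def PERSERITJA(teksti1):
--   teksti = teksti1.upper()
--   num = 0
--   for i in teksti:
--     if teksti.count(i)>=2 and i!=' ':
--       num += 1
--       teksti=teksti.replace(i,"")
--   return ("Numri i shkronjave qe perseriten ne tekst jane: "+str(num))
-- ===== SOURCE B (Python) =====
-- def PERSERITJA(teksti1):
--   chars = sorted(teksti1.upper())
--   num = 0
--   i = 0
--   n = len(chars)
--   while i < n:
--     j = i + 1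
--     while j < n and chars[j] == chars[i]:
--       j += 1
--     if j - i >= 2 and chars[i] != ' ':
--       num += 1
--     i = j
--   return ("Numri i shkronjave qe perseriten ne tekst jane: "+str(num))
-- ===== Notes on version B (the rewrite author's own statement) =====
-- stated objective: alternative
-- what changed: Replaces A's per-character count/replace rescans of the shrinking string by sorting the uppercased text once and counting maximal runs of length >= 2 in a single pass.
import Mathlib
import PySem

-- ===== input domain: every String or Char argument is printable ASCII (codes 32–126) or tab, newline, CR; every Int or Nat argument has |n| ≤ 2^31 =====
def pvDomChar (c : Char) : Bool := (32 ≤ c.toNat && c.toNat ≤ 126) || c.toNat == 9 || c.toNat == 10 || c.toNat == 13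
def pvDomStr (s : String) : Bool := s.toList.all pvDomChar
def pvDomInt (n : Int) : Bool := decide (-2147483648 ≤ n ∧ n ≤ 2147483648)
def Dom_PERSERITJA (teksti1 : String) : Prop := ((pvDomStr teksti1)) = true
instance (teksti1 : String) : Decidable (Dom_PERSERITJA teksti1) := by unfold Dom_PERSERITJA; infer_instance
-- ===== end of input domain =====

-- B sorts the uppercased text once and counts maximal runs of length ≥ 2 in one pass,
-- instead of A's repeated count/replace rescans of the shrinking string.

-- ===== PORT A =====
def PERSERITJA (teksti1 : String) : String :=
  let teksti := (PySem.Str.upper teksti1).toList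
  let st := teksti.foldl
    (fun (st : List Char × Int) i =>
      if 2 ≤ PySem.Chars.count st.1 [i] ∧ i ≠ ' ' then
        (PySem.Chars.replace st.1 [i] [], st.2 + 1)
      else st)
    (teksti, 0)
  "Numri i shkronjave qe perseriten ne tekst jane: " ++ PySem.Int.toStr st.2

-- ===== PORT B =====
-- the while loops of Source B: the inner loop measures one maximal run (takeWhile),
-- the outer loop continues after it (dropWhile)
def pvRuns : List Char → Int
  | [] => 0
  | c :: rest =>
    (if 2 ≤ (rest.takeWhile (fun x => x == c)).length + 1 ∧ c ≠ ' ' then (1 : Int) else 0)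
      + pvRuns (rest.dropWhile (fun x => x == c))
termination_by l => l.length
decreasing_by
  exact Nat.lt_succ_of_le (List.length_dropWhile_le _ _)

def PERSERITJA_alt (teksti1 : String) : String :=
  let chars := PySem.List.sorted (PySem.Str.upper teksti1).toList (fun x => x) false
  "Numri i shkronjave qe perseriten ne tekst jane: " ++ PySem.Int.toStr (pvRuns chars)

-- ===== PRECONDITION & SPEC =====
def Spec_PERSERITJA (teksti1 : String) (out : String) : Prop := out = PERSERITJA_alt teksti1
instance (teksti1 : String) (out : String) : Decidable (Spec_PERSERITJA teksti1 out) := by unfold Spec_PERSERITJA; infer_instance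

-- ===== CLAIM (what is proved, stated in full; the proofs are below) =====
def Claim_equal_PERSERITJA : Prop := ∀ (teksti1 : String), Dom_PERSERITJA teksti1 → Spec_PERSERITJA teksti1 (PERSERITJA teksti1)

-- ===== LEMMAS AND PROOFS =====

-- the common specification value: number of distinct non-space characters occurring ≥ 2 times
def pvReps (l : List Char) : ℕ := (l.toFinset.filter (fun c => 2 ≤ l.count c ∧ c ≠ ' ')).card

-- Chars.count with a single-character needle is List.count
theorem pv_count_go_singleton (i : Char) (l : List Char) :
    ∀ (fuel acc : ℕ), l.length ≤ fuel → PySem.Chars.count.go [i] fuel l acc = acc + l.count i := by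
  induction l with
  | nil => intro fuel acc h; cases fuel <;> simp [PySem.Chars.count.go]
  | cons c t ih =>
    intro fuel acc h
    cases fuel with
    | zero => simp at h
    | succ fuel =>
      rw [PySem.Chars.count.go]
      by_cases hc : c = i
      · subst hc
        have hp : [c].isPrefixOf (c :: t) = true := by simp [List.isPrefixOf]
        simp only [hp, if_true, List.length_cons, List.length_nil, Nat.zero_add, List.drop_succ_cons, List.drop_zero]
        rw [ih fuel (acc + 1) (by simpa using h)]
        simp; omega
      · have hp : [i].isPrefixOf (c :: t) = false := by
          simp [List.isPrefixOf]; exact fun hh => absurd hh.symm hc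
        simp only [hp, if_false, Bool.false_eq_true]
        rw [ih fuel acc (by simpa using h)]
        simp [hc]

theorem pv_count_singleton (l : List Char) (i : Char) :
    PySem.Chars.count l [i] = l.count i := by
  rw [PySem.Chars.count]
  simp [pv_count_go_singleton i l l.length 0 le_rfl]

-- Chars.replace of a single character by "" is List.filter
theorem pv_replace_go_singleton (i : Char) (l : List Char) :
    ∀ (fuel : ℕ) (acc : List Char), l.length ≤ fuel →
      PySem.Chars.replace.go [i] [] fuel l acc = acc.reverse ++ l.filter (fun x => x ≠ i) := by
  induction l with
  | nil => intro fuel acc h; cases fuel <;> simp [PySem.Chars.replace.go]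
  | cons c t ih =>
    intro fuel acc h
    cases fuel with
    | zero => simp at h
    | succ fuel =>
      rw [PySem.Chars.replace.go]
      by_cases hc : c = i
      · subst hc
        have hp : [c].isPrefixOf (c :: t) = true := by simp [List.isPrefixOf]
        simp only [hp, if_true, List.length_cons, List.length_nil, Nat.zero_add, List.drop_succ_cons, List.drop_zero, List.reverse_nil, List.nil_append]
        rw [ih fuel acc (by simpa using h)]
        simp
      · have hp : [i].isPrefixOf (c :: t) = false := by
          simp [List.isPrefixOf]; exact fun hh => absurd hh.symm hc
        simp only [hp, if_false, Bool.false_eq_true]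
        rw [ih fuel (c :: acc) (by simpa using h)]
        simp [hc]

theorem pv_replace_singleton (l : List Char) (i : Char) :
    PySem.Chars.replace l [i] [] = l.filter (fun x => x ≠ i) := by
  rw [PySem.Chars.replace]
  simp [pv_replace_go_singleton i l l.length [] le_rfl]

-- the invariant of A's loop: each distinct qualifying character is counted exactly once
theorem pv_loopA (rem : List Char) : ∀ (t : List Char) (num : Int),
    (rem.foldl
      (fun (st : List Char × Int) i =>
        if 2 ≤ PySem.Chars.count st.1 [i] ∧ i ≠ ' ' then
          (PySem.Chars.replace st.1 [i] [], st.2 + 1)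
        else st) (t, num)).2
    = num + ((rem.toFinset.filter (fun c => 2 ≤ t.count c ∧ c ≠ ' ')).card : ℤ) := by
  induction rem with
  | nil => intro t num; simp
  | cons i rem ih =>
    intro t num
    rw [List.foldl_cons]
    by_cases hP : 2 ≤ t.count i ∧ i ≠ ' '
    · rw [if_pos (by rw [pv_count_singleton]; exact hP), pv_replace_singleton, ih]
      have hcnt : ∀ c, (t.filter (fun x => x ≠ i)).count c = if c = i then 0 else t.count c := by
        intro c
        by_cases hci : c = i
        · subst hci; simp [List.count_eq_zero]
        · simp [hci, List.count_filter]
      have hset : rem.toFinset.filter (fun c => 2 ≤ (t.filter (fun x => x ≠ i)).count c ∧ c ≠ ' ')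
          = (rem.toFinset.filter (fun c => 2 ≤ t.count c ∧ c ≠ ' ')).erase i := by
        ext c
        simp only [Finset.mem_filter, Finset.mem_erase, hcnt]
        constructor
        · rintro ⟨hm, h2, hs⟩
          rcases eq_or_ne c i with h | h
          · simp [h] at h2
          · exact ⟨h, hm, by simpa [h] using h2, hs⟩
        · rintro ⟨h, hm, h2, hs⟩
          exact ⟨hm, by simpa [h] using h2, hs⟩
      rw [hset]
      have hstep : (i :: rem).toFinset.filter (fun c => 2 ≤ t.count c ∧ c ≠ ' ')
          = insert i (rem.toFinset.filter (fun c => 2 ≤ t.count c ∧ c ≠ ' ')) := by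
        simp [List.toFinset_cons, Finset.filter_insert, hP]
      rw [hstep]
      set S := rem.toFinset.filter (fun c => 2 ≤ t.count c ∧ c ≠ ' ') with hS
      by_cases hi : i ∈ S
      · have h1 : (S.erase i).card = S.card - 1 := Finset.card_erase_of_mem hi
        have h2 : (insert i S).card = S.card := by rw [Finset.insert_eq_self.mpr hi]
        have h3 : 1 ≤ S.card := Finset.card_pos.mpr ⟨i, hi⟩
        rw [h1, h2]; push_cast; omega
      · have h1 : S.erase i = S := Finset.erase_eq_of_notMem hi
        have h2 : (insert i S).card = S.card + 1 := Finset.card_insert_of_notMem hi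
        rw [h1, h2]; push_cast; omega
    · rw [if_neg (by rw [pv_count_singleton]; exact hP), ih]
      have : (i :: rem).toFinset.filter (fun c => 2 ≤ t.count c ∧ c ≠ ' ')
          = rem.toFinset.filter (fun c => 2 ≤ t.count c ∧ c ≠ ' ') := by
        simp [List.toFinset_cons, Finset.filter_insert, hP]
      rw [this]

-- B's run loop on a sorted list computes pvReps (each run is one distinct character)
theorem pv_runs_sorted_aux : ∀ (n : ℕ) (l : List Char), l.length ≤ n → l.Pairwise (· ≤ ·) →
    pvRuns l = (pvReps l : ℤ) := by
  intro n
  induction n with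
  | zero =>
    intro l hl _
    have : l = [] := List.length_eq_zero_iff.mp (Nat.le_zero.mp hl)
    subst this; simp [pvRuns, pvReps]
  | succ n ih =>
    intro l hl hp
    cases l with
    | nil => simp [pvRuns, pvReps]
    | cons c rest =>
      set run := rest.takeWhile (fun x => x == c) with hrun
      set after := rest.dropWhile (fun x => x == c) with hafter
      have hsplit : run ++ after = rest := List.takeWhile_append_dropWhile
      have hrunc : ∀ x ∈ run, x = c := by
        intro x hx
        have := List.mem_takeWhile_imp hx
        simpa using this
      have hge : ∀ x ∈ rest, c ≤ x := (List.pairwise_cons.mp hp).1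
      have hpa : after.Pairwise (· ≤ ·) :=
        ((List.pairwise_cons.mp hp).2.sublist (List.dropWhile_sublist _))
      have hca : c ∉ after := by
        cases hA : after with
        | nil => simp
        | cons d t =>
          have hd : ¬ (d == c) = true := by
            have := List.head_dropWhile_not (fun x => x == c) (l := rest)
              (by rw [← hafter, hA]; simp)
            simpa [← hafter, hA] using this
          have hdc : d ≠ c := by simpa using hd
          have hcd : c < d := lt_of_le_of_ne
            (hge d (by rw [← hsplit, hA]; simp)) (Ne.symm hdc)
          intro hmem
          rcases List.mem_cons.mp hmem with h | h
          · exact hdc h.symm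
          · have : d ≤ c := (List.pairwise_cons.mp (hA ▸ hpa)).1 c h
            exact absurd (lt_of_le_of_lt this hcd) (lt_irrefl _)
      have hcount_c : (c :: rest).count c = run.length + 1 := by
        rw [← hsplit]
        have h1 : run.count c = run.length := List.count_eq_length.mpr (fun b hb => ((hrunc b hb) ▸ rfl))
        have h2 : after.count c = 0 := List.count_eq_zero.mpr hca
        simp [List.count_append, h1, h2]
      have hcount_ne : ∀ c', c' ≠ c → (c :: rest).count c' = after.count c' := by
        intro c' hne
        rw [← hsplit]
        have h1 : run.count c' = 0 := List.count_eq_zero.mpr (fun hm => hne (hrunc c' hm))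
        simp [List.count_cons, List.count_append, h1]
        exact fun h => hne h.symm
      have hfin : (c :: rest).toFinset = insert c after.toFinset := by
        ext x
        simp only [List.mem_toFinset, Finset.mem_insert, List.mem_cons, ← hsplit, List.mem_append]
        constructor
        · rintro (h | h | h)
          · exact Or.inl h
          · exact Or.inl (hrunc x h)
          · exact Or.inr (by simpa using h)
        · rintro (h | h)
          · exact Or.inl h
          · exact Or.inr (Or.inr (by simpa using h))
      have hfiltcong : after.toFinset.filter (fun c' => 2 ≤ (c :: rest).count c' ∧ c' ≠ ' ')
          = after.toFinset.filter (fun c' => 2 ≤ after.count c' ∧ c' ≠ ' ') := by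
        apply Finset.filter_congr
        intro x hx
        have hxc : x ≠ c := fun h => hca (h ▸ (List.mem_toFinset.mp hx))
        rw [hcount_ne x hxc]
      have hiH : pvRuns after = (pvReps after : ℤ) := by
        apply ih after _ hpa
        calc after.length ≤ rest.length := List.length_dropWhile_le _ _
          _ ≤ n := by simpa using hl
      rw [pvRuns, hiH]
      unfold pvReps
      rw [hfin, Finset.filter_insert, hfiltcong]
      by_cases hc : 2 ≤ run.length + 1 ∧ c ≠ ' '
      · rw [if_pos (show 2 ≤ (rest.takeWhile (fun x => x == c)).length + 1 ∧ c ≠ ' ' by rw [← hrun]; exact hc),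
            if_pos (show 2 ≤ (c :: rest).count c ∧ c ≠ ' ' from ⟨by rw [hcount_c]; exact hc.1, hc.2⟩)]
        have hnm : c ∉ after.toFinset.filter (fun c' => 2 ≤ after.count c' ∧ c' ≠ ' ') := by
          intro h
          exact hca (List.mem_toFinset.mp (Finset.mem_of_mem_filter c h))
        rw [Finset.card_insert_of_notMem hnm]
        push_cast; ring
      · rw [if_neg (show ¬(2 ≤ (rest.takeWhile (fun x => x == c)).length + 1 ∧ c ≠ ' ') by rw [← hrun]; exact hc),
            if_neg (show ¬(2 ≤ (c :: rest).count c ∧ c ≠ ' ') by rw [hcount_c]; exact hc)]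
        simp

theorem pv_runs_sorted (l : List Char) (h : l.Pairwise (· ≤ ·)) :
    pvRuns l = (pvReps l : ℤ) := pv_runs_sorted_aux l.length l le_rfl h

-- pvReps is invariant under permutation (sorting)
theorem pv_reps_perm (l l' : List Char) (h : l.Perm l') : pvReps l = pvReps l' := by
  unfold pvReps
  have hfs : l.toFinset = l'.toFinset := by ext x; simp [h.mem_iff]
  rw [hfs]
  congr 1
  apply Finset.filter_congr
  intro x _
  rw [h.count_eq]

-- ===== VERDICT (by name: the statement is the Claim_ definition above) =====
theorem PERSERITJA_spec : Claim_equal_PERSERITJA := by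
  intro teksti1 _
  show PERSERITJA teksti1 = PERSERITJA_alt teksti1
  set l := (PySem.Str.upper teksti1).toList with hl
  have hsorted : (PySem.List.sorted l (fun x => x) false).Pairwise (· ≤ ·) := by
    have := PySem.List.sorted_pairwise (xs := l) (key := fun x => x)
    simpa using this
  have key : (l.foldl
      (fun (st : List Char × Int) i =>
        if 2 ≤ PySem.Chars.count st.1 [i] ∧ i ≠ ' ' then
          (PySem.Chars.replace st.1 [i] [], st.2 + 1)
        else st) (l, 0)).2 = pvRuns (PySem.List.sorted l (fun x => x) false) := by
    rw [pv_loopA, pv_runs_sorted _ hsorted, pv_reps_perm _ _ (PySem.List.sorted_perm _ _ _)]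
    simp [pvReps]
  exact congrArg (fun z : Int => "Numri i shkronjave qe perseriten ne tekst jane: " ++ PySem.Int.toStr z) key
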